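-- pv_equiv track=rewrite | github.com/sidjayas31/Inference-in-Bayesian-Networks | bayesnets.py | querytovector
-- ===== SOURCE A (Python) =====
-- def querytovector(topology,query,evidence,negate=False):
--     vector=[]
--     for item in topology:
--         if item in query:
--             if not negate:
--                 vector.append('T')
--             else:
--                 vector.append('F')
--         elif item in [a for (a,b) in evidence]:
--             vector.append([b for (a,b) in evidence if a==item][0])
--         else:
--             vector.append('-')
--     return vector
-- ===== SOURCE B (Python) =====
-- def querytovector(topology, query, evidence, negate=False):
--     # scatter: start with an all-'-' vector and write into it by index;
--     # evidence is processed in reverse so the FIRST matching pair wins,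
--     # query writes come last so query overrides evidence.
--     vector = ['-'] * len(topology)
--     positions = {}
--     for i, t in enumerate(topology):
--         positions.setdefault(t, []).append(i)
--     for a, b in reversed(evidence):
--         for i in positions.get(a, []):
--             vector[i] = b
--     flag = 'F' if negate else 'T'
--     for item in query:
--         for i in positions.get(item, []):
--             vector[i] = flag
--     return vector
-- ===== Notes on version B (the rewrite author's own statement) =====
-- stated objective: faster
-- what changed: B scatters instead of gathers: it builds a positions index of topology once, starts from an all-'-' output vector and writes values into it by index — per evidence pair (processed in reverse so the first matching pair wins) and per query item (last, so query overrides evidence) — replacing A's per-topology-item three-way branch that scans query and filters evidence for every element.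
import Mathlib
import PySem

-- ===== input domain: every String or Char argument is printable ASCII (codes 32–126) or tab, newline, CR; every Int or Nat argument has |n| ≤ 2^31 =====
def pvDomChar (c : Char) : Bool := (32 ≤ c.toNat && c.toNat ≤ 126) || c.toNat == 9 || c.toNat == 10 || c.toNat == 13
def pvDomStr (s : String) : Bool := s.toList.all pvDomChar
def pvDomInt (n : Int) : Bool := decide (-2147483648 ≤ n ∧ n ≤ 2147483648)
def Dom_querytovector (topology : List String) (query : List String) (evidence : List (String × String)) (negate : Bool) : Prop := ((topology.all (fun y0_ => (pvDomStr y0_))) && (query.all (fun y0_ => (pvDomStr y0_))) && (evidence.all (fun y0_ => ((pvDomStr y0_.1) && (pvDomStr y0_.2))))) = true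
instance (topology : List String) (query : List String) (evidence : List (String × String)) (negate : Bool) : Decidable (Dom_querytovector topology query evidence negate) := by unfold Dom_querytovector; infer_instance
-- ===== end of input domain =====

-- B inverts A's data flow (scatter vs gather): it indexes topology once, starts from an all-'-'
-- vector and writes values into it by position — per evidence pair (in reverse, so the first
-- match wins) and per query item (last, so query overrides) — removing A's per-item scans.

-- ===== PORT A =====
-- literal transliteration of A's loop: `[a for (a,b) in evidence]` is evidence.map (·.1);
-- `[b for ... if a==item][0]` is guarded by the elif, so the head match's [] case is unreachable
def querytovector (topology : List String) (query : List String) (evidence : List (String × String)) (negate : Bool) : List String :=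
  topology.foldl (fun vector item =>
    if query.contains item then
      if !negate then vector ++ ["T"] else vector ++ ["F"]
    else if (evidence.map (fun p => p.1)).contains item then
      vector ++ [match (evidence.filter (fun p => p.1 == item)).map (fun p => p.2) with
                 | [] => ""          -- unreachable: the elif guarantees a match (Python would raise IndexError)
                 | v :: _ => v]
    else vector ++ ["-"]) []

-- ===== PORT B =====
-- `positions.setdefault(t, []).append(i)` is `d.modify t [] (· ++ [i])` (d[t] = d.get(t, []) + [i]);
-- `vector[i] = b` on an in-range index is `PySem.List.pySetD`
def querytovector_alt (topology : List String) (query : List String) (evidence : List (String × String)) (negate : Bool) : List String :=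
  let positions : PySem.Dict String (List Int) :=
    (PySem.List.enumerate topology).foldl (fun d p => d.modify p.2 [] (· ++ [p.1])) PySem.Dict.empty
  let v0 := List.replicate topology.length "-"
  let v1 := evidence.reverse.foldl
    (fun v p => (positions.getD p.1 []).foldl (fun v i => PySem.List.pySetD v i p.2) v) v0
  let flag := if negate then "F" else "T"
  query.foldl (fun v item => (positions.getD item []).foldl (fun v i => PySem.List.pySetD v i flag) v) v1

-- ===== PRECONDITION & SPEC =====
def Spec_querytovector (topology : List String) (query : List String) (evidence : List (String × String)) (negate : Bool) (out : List String) : Prop := out = querytovector_alt topology query evidence negate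
instance (topology : List String) (query : List String) (evidence : List (String × String)) (negate : Bool) (out : List String) : Decidable (Spec_querytovector topology query evidence negate out) := by unfold Spec_querytovector; infer_instance

-- ===== CLAIM (what is proved, stated in full; the proofs are below) =====
def Claim_equal_querytovector : Prop := ∀ (topology : List String) (query : List String) (evidence : List (String × String)) (negate : Bool), Dom_querytovector topology query evidence negate → Spec_querytovector topology query evidence negate (querytovector topology query evidence negate)

-- ===== LEMMAS AND PROOFS =====

-- the occurrence-index list of t in topology (what B's positions dict stores at t)
def qtvOcc (topology : List String) (t : String) : List Int :=
  ((PySem.List.enumerate topology).filter (fun p => p.2 == t)).map (fun p => p.1)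

-- B's positions dict looks up exactly the occurrence indices
theorem positions_getD (topology : List String) (t : String) :
    ((PySem.List.enumerate topology).foldl
        (fun d p => d.modify p.2 [] (· ++ [p.1])) (PySem.Dict.empty : PySem.Dict String (List Int))).getD t []
      = qtvOcc topology t := by
  have h : (PySem.List.enumerate topology).foldl
      (fun d p => d.modify p.2 [] (· ++ [p.1])) (PySem.Dict.empty : PySem.Dict String (List Int))
      = ((PySem.List.enumerate topology).map (fun p => (p.2, p.1))).foldl
          (fun d q => d.modify q.1 [] (· ++ [q.2])) PySem.Dict.empty := by
    rw [List.foldl_map]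
  rw [h, PySem.Dict.getD_foldl_modify_append]
  simp [qtvOcc, List.filter_map, Function.comp_def]

-- membership in the occurrence list
theorem mem_qtvOcc (topology : List String) (t : String) (i : Int) :
    i ∈ qtvOcc topology t ↔ ∃ (k : Nat) (_ : k < topology.length), i = (k : Int) ∧ topology[k] = t := by
  simp only [qtvOcc, List.mem_map, List.mem_filter, PySem.List.mem_enumerate_iff]
  constructor
  · rintro ⟨p, ⟨⟨k, hk, rfl⟩, hpt⟩, rfl⟩
    exact ⟨k, hk, by simp, by simpa using hpt⟩
  · rintro ⟨k, hk, rfl, ht⟩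
    exact ⟨((k : Int), topology[k]), ⟨⟨k, hk, by simp⟩, by simpa using ht⟩, rfl⟩

theorem qtvOcc_nonneg (topology : List String) (t : String) (i : Int) (h : i ∈ qtvOcc topology t) : 0 ≤ i := by
  rcases (mem_qtvOcc topology t i).1 h with ⟨k, _, rfl, _⟩
  exact Int.natCast_nonneg k

-- a fold of in-place writes, read back elementwise
theorem foldl_pySetD_getElem? (b : String) :
    ∀ (idxs : List Int) (v : List String) (j : Nat), (∀ i ∈ idxs, 0 ≤ i) →
      (idxs.foldl (fun v i => PySem.List.pySetD v i b) v)[j]?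
        = if (j : Int) ∈ idxs then (if j < v.length then some b else none) else v[j]? := by
  intro idxs
  induction idxs with
  | nil => intro v j _; simp
  | cons i rest ih =>
    intro v j hnn
    have hi : 0 ≤ i := hnn i (List.mem_cons_self)
    rw [List.foldl_cons, ih _ _ (fun x hx => hnn x (List.mem_cons_of_mem _ hx))]
    rw [PySem.List.pySetD_of_nonneg _ _ hi]
    have hlen : (v.set i.toNat b).length = v.length := by simp
    by_cases hr : (j : Int) ∈ rest
    · simp [hr, hlen]
    · by_cases hji : (j : Int) = i
      · have hji' : i.toNat = j := by omega
        simp only [hr, if_false, List.getElem?_set, hji']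
        simp [hji]
      · have hji' : i.toNat ≠ j := by omega
        have : (j : Int) ∈ i :: rest ↔ False := by simp [hji, hr]
        simp only [this, if_false, List.getElem?_set, hji']
        simp [hr]

-- one scatter pass over the occurrence list updates the pointwise function
theorem occ_fold_map (topology : List String) (t b : String) (g : String → String) :
    (qtvOcc topology t).foldl (fun v i => PySem.List.pySetD v i b) (topology.map g)
      = topology.map (fun s => if s == t then b else g s) := by
  apply List.ext_getElem?
  intro j
  rw [foldl_pySetD_getElem? b _ _ _ (qtvOcc_nonneg topology t)]
  by_cases hj : j < topology.length
  · have hmem : (j : Int) ∈ qtvOcc topology t ↔ topology[j] = t := by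
      rw [mem_qtvOcc]
      constructor
      · rintro ⟨k, hk, hkj, ht⟩
        have : k = j := by omega
        subst this; exact ht
      · intro ht; exact ⟨j, hj, rfl, ht⟩
    by_cases ht : topology[j] = t
    · have hb : (topology[j] == t) = true := by simp [ht]
      simp only [hmem.2 ht, if_true, List.getElem?_map, List.getElem?_eq_getElem hj,
        Option.map_some]
      simp [hb, hj]
    · have hb : (topology[j] == t) = false := by simpa using ht
      have hnm : (j : Int) ∉ qtvOcc topology t := fun h => ht (hmem.1 h)
      simp only [hnm, if_false, List.getElem?_map, List.getElem?_eq_getElem hj, Option.map_some]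
      simp [hb]
  · have h1 : topology.length ≤ j := by omega
    have hnm : (j : Int) ∉ qtvOcc topology t := by
      intro h
      rcases (mem_qtvOcc topology t _).1 h with ⟨k, hk, hkj, _⟩
      omega
    simp [hnm, hj]

-- the reversed-evidence scatter realizes the FIRST evidence match
theorem ev_fold (topology : List String) :
    ∀ (e : List (String × String)) (g : String → String),
      e.reverse.foldl
          (fun v p => (qtvOcc topology p.1).foldl (fun v i => PySem.List.pySetD v i p.2) v)
          (topology.map g)
        = topology.map (fun t => match e.find? (fun p => p.1 == t) with
                                 | some p => p.2
                                 | none => g t) := by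
  intro e
  induction e with
  | nil => intro g; simp
  | cons p e ih =>
    intro g
    rw [List.reverse_cons, List.foldl_append, ih, List.foldl_cons, List.foldl_nil, occ_fold_map]
    refine List.map_congr_left fun t _ => ?_
    by_cases h : p.1 = t
    · have hb : (p.1 == t) = true := by simp [h]
      rw [List.find?_cons_of_pos (p := fun q => q.1 == t) (a := p) (l := e) hb]
      simp [h]
    · have hb : (p.1 == t) = false := by simpa using h
      have hb' : (t == p.1) = false := by
        simp only [beq_eq_false_iff_ne, ne_eq]; exact fun hc => h hc.symm
      rw [List.find?_cons_of_neg (p := fun q => q.1 == t) (a := p) (l := e) (by simp [hb])]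
      simp [hb']

-- the query scatter overwrites every queried position with the flag
theorem q_fold (topology : List String) (flag : String) :
    ∀ (q : List String) (g : String → String),
      q.foldl (fun v item => (qtvOcc topology item).foldl (fun v i => PySem.List.pySetD v i flag) v)
          (topology.map g)
        = topology.map (fun t => if q.contains t then flag else g t) := by
  intro q
  induction q with
  | nil => intro g; simp
  | cons a q ih =>
    intro g
    rw [List.foldl_cons, occ_fold_map, ih]
    refine List.map_congr_left fun t _ => ?_
    by_cases hq : t ∈ q
    · simp [hq]
    · by_cases ha : t = a
      · simp [ha]
      · simp [hq, ha]

-- an append-only foldl is the accumulator followed by a map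
theorem foldl_append_singleton {α β : Type} (g : α → β) :
    ∀ (l : List α) (acc : List β), l.foldl (fun v i => v ++ [g i]) acc = acc ++ l.map g := by
  intro l
  induction l with
  | nil => simp
  | cons a l ih => intro acc; simp [List.foldl, ih]

-- A's elif/filter branch computes the first evidence match, i.e. find?
theorem filter_head_eq_find :
    ∀ (e : List (String × String)) (item : String),
      (if (e.map (fun p => p.1)).contains item then
        (match (e.filter (fun p => p.1 == item)).map (fun p => p.2) with
         | [] => ""
         | v :: _ => v)
       else "-")
      = (match e.find? (fun p => p.1 == item) with
         | some p => p.2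
         | none => "-") := by
  intro e
  induction e with
  | nil => intro item; simp
  | cons p e ih =>
    intro item
    by_cases hk : p.1 = item
    · have hb : (p.1 == item) = true := by simp [hk]
      have hb' : (item == p.1) = true := by simp [hk]
      rw [List.find?_cons_of_pos (p := fun q => q.1 == item) (a := p) (l := e) hb]
      simp [hk]
    · have hb : (p.1 == item) = false := by simpa using hk
      have hb' : (item == p.1) = false := by
        simp only [beq_eq_false_iff_ne, ne_eq]
        exact fun h => hk h.symm
      rw [List.find?_cons_of_neg (p := fun q => q.1 == item) (a := p) (l := e) (by simp [hb])]
      simp only [List.map_cons, List.contains_cons, hb', List.filter_cons, hb,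
        Bool.false_or, if_false, Bool.false_eq_true]
      exact ih item

-- ===== VERDICT (by name: the statement is the Claim_ definition above) =====
theorem querytovector_spec : Claim_equal_querytovector := by
  intro topology query evidence negate _
  unfold Spec_querytovector querytovector querytovector_alt
  have hstep : (fun (vector : List String) (item : String) =>
      if query.contains item then
        if !negate then vector ++ ["T"] else vector ++ ["F"]
      else if (evidence.map (fun p => p.1)).contains item then
        vector ++ [match (evidence.filter (fun p => p.1 == item)).map (fun p => p.2) with
                   | [] => ""
                   | v :: _ => v]
      else vector ++ ["-"]) =
    (fun vector item => vector ++
        [if query.contains item then (if !negate then "T" else "F")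
         else if (evidence.map (fun p => p.1)).contains item then
           (match (evidence.filter (fun p => p.1 == item)).map (fun p => p.2) with
            | [] => ""
            | v :: _ => v)
         else "-"]) := by
    funext vector item; split_ifs <;> rfl
  rw [hstep, foldl_append_singleton]
  simp only [List.nil_append]
  have hpos : ∀ (t : String),
      ((PySem.List.enumerate topology).foldl
        (fun d p => d.modify p.2 [] (· ++ [p.1])) (PySem.Dict.empty : PySem.Dict String (List Int))).getD t []
      = qtvOcc topology t := positions_getD topology
  simp only [hpos]
  have hrep : List.replicate topology.length "-" = topology.map (fun _ => "-") :=
    (List.map_const' ..).symm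
  rw [hrep, ev_fold, q_fold]
  refine List.map_congr_left fun item _ => ?_
  by_cases hq : item ∈ query
  · have hqc : query.contains item = true := by simpa using hq
    rw [if_pos hqc, if_pos hqc]
    cases negate <;> rfl
  · have hqc : query.contains item = false := by simpa using hq
    simp only [hqc, Bool.false_eq_true, if_false]
    exact (filter_head_eq_find evidence item)
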